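-- pv_equiv track=rewrite | github.com/calivan0423/algorithm | fastcampus/기초문제 풀이/음계.py | Discrimination_asc
-- ===== SOURCE A (Python) =====
-- def Discrimination_asc(list):
--     type = True
--     a = list[0]
--
--     for i in range(1,len(list)):
--          if list[i]==(a+1):
--              a=list[i]
--              continue
--          else:
--             type = False
--             break
--
--     return type
-- ===== SOURCE B (Python) =====
-- def Discrimination_asc(list):
--     first = list[0]
--     return list == [first + i for i in range(len(list))]
-- ===== Notes on version B (the rewrite author's own statement) =====
-- stated objective: simpler
-- what changed: B builds the full expected consecutive sequence starting at list[0] and compares it to the input in one equality, instead of A's element-by-element scan with a break flag.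
import Mathlib
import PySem

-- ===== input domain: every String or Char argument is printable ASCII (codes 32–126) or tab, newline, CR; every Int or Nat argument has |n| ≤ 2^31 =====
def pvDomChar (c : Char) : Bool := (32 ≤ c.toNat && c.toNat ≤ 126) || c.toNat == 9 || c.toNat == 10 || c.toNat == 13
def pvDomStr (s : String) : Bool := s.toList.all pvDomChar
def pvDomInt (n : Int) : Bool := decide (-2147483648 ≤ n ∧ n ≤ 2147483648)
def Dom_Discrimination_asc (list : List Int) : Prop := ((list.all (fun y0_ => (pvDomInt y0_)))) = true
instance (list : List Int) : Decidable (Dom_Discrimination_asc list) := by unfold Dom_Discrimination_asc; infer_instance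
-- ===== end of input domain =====

-- B builds the expected consecutive sequence and compares once; A scans with a break flag.
-- Both raise IndexError on the empty list (excluded by Pre_); equivalence is about the return value.

-- ===== PORT A =====
-- the for-loop over range(1, len(list)) with state `a` and early break
def DiscALoop (a : Int) : List Int → Bool
  | [] => true
  | x :: xs => if x = a + 1 then DiscALoop x xs else false

def Discrimination_asc (list : List Int) : Bool :=
  match list with
  | [] => true   -- unreachable under Pre_ (Python raises IndexError on list[0])
  | a :: rest => DiscALoop a rest

-- ===== PORT B =====
def Discrimination_asc_alt (list : List Int) : Bool :=
  match list with
  | [] => true   -- unreachable under Pre_ (Python raises IndexError on list[0])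
  | first :: _ => decide (list = (List.range list.length).map (fun (i : Nat) => first + (i : Int)))

-- ===== PRECONDITION & SPEC =====
-- Pre_ excludes exactly the empty list, on which A (and B) raise IndexError at list[0].
def Pre_Discrimination_asc (list : List Int) : Prop := list ≠ []
instance (list : List Int) : Decidable (Pre_Discrimination_asc list) := by unfold Pre_Discrimination_asc; infer_instance
def pvWitness_Discrimination_asc : List Int := [3, 4, 5]

def Spec_Discrimination_asc (list : List Int) (out : Bool) : Prop := out = Discrimination_asc_alt list
instance (list : List Int) (out : Bool) : Decidable (Spec_Discrimination_asc list out) := by unfold Spec_Discrimination_asc; infer_instance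

-- ===== CLAIM (what is proved, stated in full; the proofs are below) =====
def Claim_equal_Discrimination_asc : Prop := ∀ (list : List Int), Dom_Discrimination_asc list → Pre_Discrimination_asc list → Spec_Discrimination_asc list (Discrimination_asc list)

-- ===== LEMMAS AND PROOFS =====
def expFrom (a : Int) : Nat → List Int
  | 0 => []
  | n + 1 => a :: expFrom (a + 1) n

lemma expFrom_eq_map (n : Nat) : ∀ (a : Int),
    (List.range n).map (fun (i : Nat) => a + (i : Int)) = expFrom a n := by
  induction n with
  | zero => intro a; simp [expFrom]
  | succ n ih =>
    intro a
    rw [List.range_succ_eq_map, List.map_cons, List.map_map]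
    simp only [expFrom, Nat.cast_zero, add_zero, List.cons.injEq, true_and]
    rw [← ih (a + 1)]
    apply List.map_congr_left
    intro i _
    simp only [Function.comp_apply, Nat.succ_eq_add_one]
    push_cast
    ring

lemma discALoop_eq (xs : List Int) : ∀ (a : Int),
    DiscALoop a xs = decide (xs = expFrom (a + 1) xs.length) := by
  induction xs with
  | nil => intro a; simp [DiscALoop, expFrom]
  | cons x xs ih =>
    intro a
    simp only [DiscALoop, List.length_cons, expFrom]
    by_cases h : x = a + 1
    · subst h
      rw [ih]
      simp
    · simp [h]

-- ===== VERDICT (by name: the statement is the Claim_ definition above) =====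
theorem Discrimination_asc_spec : Claim_equal_Discrimination_asc := by
  intro list _ hpre
  unfold Spec_Discrimination_asc
  match list with
  | [] => exact absurd rfl hpre
  | a :: rest =>
    simp only [Discrimination_asc, Discrimination_asc_alt, discALoop_eq, List.length_cons,
      expFrom_eq_map, expFrom, List.cons.injEq, true_and]
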